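-- pv_equiv track=rewrite | github.com/hong0002/Baekjoon | 기타/FA.py | is_fa_number
-- ===== SOURCE A (Python) =====
-- def first_digit_and_length_product(x):
--     x_str = str(x)
--     first_digit = int(x_str[0])
--     length = len(x_str)
--     return first_digit * length
--
-- def is_fa_number(x):
--     seen = set()
--     current = x
--
--     while current not in seen:
--         seen.add(current)
--         next_value = first_digit_and_length_product(current)
--         if next_value == current:
--             return "FA"
--         current = next_value
--
--     return "NFA"
-- ===== SOURCE B (Python) =====
-- def first_digit_and_length_product(x):
--     x_str = str(x)
--     first_digit = int(x_str[0])
--     length = len(x_str)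
--     return first_digit * length
--
-- def is_fa_number(x):
--     # Floyd tortoise-and-hare cycle detection instead of a visited set:
--     # the iteration first_digit*length always falls into a cycle; it ends
--     # at a fixed point ("FA") exactly when that cycle has length 1.
--     f = first_digit_and_length_product
--     tortoise = f(x)
--     hare = f(tortoise)
--     while tortoise != hare:
--         tortoise = f(tortoise)
--         hare = f(f(hare))
--     return "FA" if f(tortoise) == tortoise else "NFA"
-- ===== Notes on version B (the rewrite author's own statement) =====
-- stated objective: alternative
-- what changed: Replaced A's visited-set loop (grow a set until the iterate current -> first_digit*length repeats or fixes) with Floyd's tortoise-and-hare cycle detection: advance one pointer one step and another two steps until they meet on the cycle, then answer FA iff the meeting value is a fixed point; no set is maintained.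
import Mathlib
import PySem

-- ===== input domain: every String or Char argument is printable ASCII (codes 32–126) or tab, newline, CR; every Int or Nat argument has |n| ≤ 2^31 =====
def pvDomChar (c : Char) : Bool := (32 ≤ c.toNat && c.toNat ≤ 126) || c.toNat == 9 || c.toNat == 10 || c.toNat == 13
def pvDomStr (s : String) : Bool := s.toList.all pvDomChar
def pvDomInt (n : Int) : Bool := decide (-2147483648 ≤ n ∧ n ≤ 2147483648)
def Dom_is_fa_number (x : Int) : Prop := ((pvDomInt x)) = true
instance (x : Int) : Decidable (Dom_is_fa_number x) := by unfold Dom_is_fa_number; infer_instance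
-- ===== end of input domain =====

-- B replaces A's visited-set loop by Floyd's tortoise-and-hare cycle detection (alternative
-- algorithm, same cost class); equivalence is about the return value on x ≥ 0 (A raises
-- ValueError on negative x, which Pre_ excludes; B raises there too).

-- ===== PORT A =====
-- first_digit_and_length_product (module-level helper shared by both Pythons):
-- none = the ValueError of int(x_str[0]) (first char '-' for negative x)
def fdlp? (x : Int) : Option Int :=
  let xs := PySem.Int.toChars x
  match PySem.List.pyGet? xs 0 with
  | none => none
  | some c =>
    match PySem.Int.ofChars? [c] with
    | none => none
    | some d => some (d * (xs.length : Int))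

-- the while-loop of A; fuel only makes the recursion structural ("" = fuel exhausted,
-- never reached from any admitted x: after one step the iterate stays in [0,90])
def isFaLoopA (fuel : Nat) (seen : PySem.Set Int) (current : Int) : String :=
  match fuel with
  | 0 => ""
  | fuel + 1 =>
    if PySem.Set.contains seen current then "NFA"
    else
      let seen' := PySem.Set.add seen current
      match fdlp? current with
      | none => ""   -- ValueError propagates (excluded by Pre_)
      | some next => if next = current then "FA" else isFaLoopA fuel seen' next

def is_fa_number (x : Int) : String := isFaLoopA 300 PySem.Set.empty x

-- ===== PORT B =====
-- the while-loop of B: advance tortoise one step, hare two, until they meet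
def isFaLoopB (fuel : Nat) (tortoise hare : Int) : String :=
  match fuel with
  | 0 => ""
  | fuel + 1 =>
    if tortoise = hare then
      match fdlp? tortoise with
      | none => ""
      | some v => if v = tortoise then "FA" else "NFA"
    else
      match fdlp? tortoise with
      | none => ""
      | some t' =>
        match fdlp? hare with
        | none => ""
        | some h1 =>
          match fdlp? h1 with
          | none => ""
          | some h' => isFaLoopB fuel t' h'

def is_fa_number_alt (x : Int) : String :=
  match fdlp? x with
  | none => ""
  | some t =>
    match fdlp? t with
    | none => ""
    | some h => isFaLoopB 300 t h

-- ===== PRECONDITION & SPEC =====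
-- A raises ValueError (int('-')) exactly on negative x; Pre_ keeps every input A returns on.
def Pre_is_fa_number (x : Int) : Prop := 0 ≤ x
instance (x : Int) : Decidable (Pre_is_fa_number x) := by unfold Pre_is_fa_number; infer_instance
def pvWitness_is_fa_number : Int := (19)

def Spec_is_fa_number (x : Int) (out : String) : Prop := out = is_fa_number_alt x
instance (x : Int) (out : String) : Decidable (Spec_is_fa_number x out) := by unfold Spec_is_fa_number; infer_instance

-- ===== CLAIM (what is proved, stated in full; the proofs are below) =====
def Claim_equal_is_fa_number : Prop := ∀ (x : Int), Dom_is_fa_number x → Pre_is_fa_number x → Spec_is_fa_number x (is_fa_number x)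

-- ===== LEMMAS AND PROOFS =====

-- every character pushed by Nat.toDigitsCore base 10 is a digit character
lemma toDigitsCore_all_digits (f : Nat) : ∀ (n : Nat) (l : List Char),
    (∀ c ∈ l, ∃ k, k < 10 ∧ c = Nat.digitChar k) →
    ∀ c ∈ Nat.toDigitsCore 10 f n l, ∃ k, k < 10 ∧ c = Nat.digitChar k := by
  induction f with
  | zero => intro n l hl; simpa [Nat.toDigitsCore] using hl
  | succ f ih =>
    intro n l hl c hc
    simp only [Nat.toDigitsCore] at hc
    split at hc
    · rcases List.mem_cons.1 hc with h | h
      · exact ⟨n % 10, Nat.mod_lt _ (by norm_num), h⟩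
      · exact hl c h
    · refine ih (n / 10) _ ?_ c hc
      intro c hc
      rcases List.mem_cons.1 hc with h | h
      · exact ⟨n % 10, Nat.mod_lt _ (by norm_num), h⟩
      · exact hl c h

lemma toDigitsCore_ne_nil_of_ne_nil (f : Nat) : ∀ (n : Nat) (l : List Char), l ≠ [] →
    Nat.toDigitsCore 10 f n l ≠ [] := by
  induction f with
  | zero => intro n l hl; simpa [Nat.toDigitsCore] using hl
  | succ f ih =>
    intro n l hl
    simp only [Nat.toDigitsCore]
    split
    · simp
    · exact ih (n / 10) _ (by simp)

lemma toDigits_ne_nil (n : Nat) : Nat.toDigits 10 n ≠ [] := by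
  unfold Nat.toDigits
  simp only [Nat.toDigitsCore]
  split
  · simp
  · exact toDigitsCore_ne_nil_of_ne_nil _ _ _ (by simp)

lemma ofChars_digitChar : ∀ k, k < 10 → PySem.Int.ofChars? [Nat.digitChar k] = some (k : Int) := by
  decide

-- the helper's value: a nonnegative x ≤ 2^31 (so < 10^10) maps into [0, 90]
lemma fdlp_bound (x : Int) (hx : 0 ≤ x) (hb : x ≤ 2147483648) :
    ∃ m : Nat, m ≤ 90 ∧ fdlp? x = some (m : Int) := by
  have hneg : ¬ x < 0 := by omega
  have hxs : PySem.Int.toChars x = Nat.toDigits 10 x.toNat := by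
    simp [PySem.Int.toChars, hneg]
  rcases hds : Nat.toDigits 10 x.toNat with _ | ⟨c, rest⟩
  · exact absurd hds (toDigits_ne_nil _)
  · have hcdig : ∃ k, k < 10 ∧ c = Nat.digitChar k := by
      have := toDigitsCore_all_digits (x.toNat + 1) x.toNat [] (by simp)
      exact this c (by rw [← Nat.toDigits, hds]; simp)
    rcases hcdig with ⟨k, hk, rfl⟩
    have hlen : (Nat.toDigits 10 x.toNat).length ≤ 10 := by
      apply Nat.toDigits_length 10 x.toNat 10 (by norm_num)
      have : x.toNat ≤ 2147483648 := by omega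
      omega
    rw [hds] at hlen
    refine ⟨k * (rest.length + 1), ?_, ?_⟩
    · have : rest.length + 1 ≤ 10 := by simpa using hlen
      nlinarith
    · simp only [fdlp?, hxs, hds, PySem.List.pyGet?, PySem.List.pyIdx?]
      norm_num [ofChars_digitChar k hk]

-- the successor function on [0,90], used to name fdlp?'s value there
def next91 (n : Nat) : Nat := ((fdlp? (n : Int)).getD 0).toNat

set_option maxHeartbeats 1000000 in
lemma fdlp_small : ∀ n : Nat, n < 91 →
    fdlp? (n : Int) = some ((next91 n : Nat) : Int) ∧ next91 n < 91 := by
  decide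

-- an element > 90 at the head of the seen-set never matters once the current value is ≤ 90
lemma isFaLoopA_drop_head (fuel : Nat) : ∀ (x : Int), 90 < x → ∀ (s : List Int) (c : Nat),
    c < 91 → isFaLoopA fuel (x :: s) (c : Int) = isFaLoopA fuel s (c : Int) := by
  induction fuel with
  | zero => intro x hx s c hc; rfl
  | succ fuel ih =>
    intro x hx s c hc
    have hne : ¬ ((c : Int) = x) := by omega
    have hcx : (((c : Int)) == x) = false := by simp [hne]
    by_cases hmem : ((c : Int) ∈ s)
    · have hcont : s.contains (c : Int) = true := by simpa using hmem
      simp [isFaLoopA, PySem.Set.contains, hmem]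
    · have hcont : s.contains (c : Int) = false := by simpa using hmem
      simp only [isFaLoopA, PySem.Set.contains, List.contains_cons, hcx, hcont,
        Bool.or_false, Bool.false_eq_true, if_false]
      have hadd : PySem.Set.add (x :: s) (c : Int) = x :: PySem.Set.add s (c : Int) := by
        simp [PySem.Set.add, PySem.Set.contains, hne, hmem]
      rcases fdlp_small c hc with ⟨hsome, hm⟩
      rw [hadd, hsome]
      by_cases heq : ((next91 c : Nat) : Int) = (c : Int)
      · simp [heq]
      · simp only [heq, if_false]
        exact ih x hx _ (next91 c) hm

-- A = B outright on [0,90] …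
set_option maxHeartbeats 1000000 in
lemma small_eq : ∀ n : Nat, n < 91 → is_fa_number (n : Int) = is_fa_number_alt (n : Int) := by
  decide

-- … and A's remaining loop after its first step equals B's Floyd loop started at that step
set_option maxHeartbeats 1000000 in
lemma tail_eq : ∀ k : Nat, k < 91 →
    isFaLoopA 299 [] (k : Int) =
      (match fdlp? (k : Int) with
       | none => ""
       | some h => isFaLoopB 300 (k : Int) h) := by
  decide

-- one unfolding of A's loop
lemma isFaLoopA_step (fuel : Nat) (seen : PySem.Set Int) (c : Int) :
    isFaLoopA (fuel + 1) seen c =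
      if PySem.Set.contains seen c then "NFA"
      else
        match fdlp? c with
        | none => ""
        | some next => if next = c then "FA" else isFaLoopA fuel (PySem.Set.add seen c) next := rfl

-- ===== VERDICT (by name: the statement is the Claim_ definition above) =====
theorem is_fa_number_spec : Claim_equal_is_fa_number := by
  intro x hdom hpre
  unfold Spec_is_fa_number
  have hpre' : (0 : Int) ≤ x := hpre
  have hb : x ≤ 2147483648 := by
    have := of_decide_eq_true hdom
    omega
  by_cases hsmall : x ≤ 90
  · have hx : x = ((x.toNat : Nat) : Int) := by omega
    rw [hx]
    exact small_eq x.toNat (by omega)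
  · -- x > 90: one step of A lands in [0,90], where the seen entry x is irrelevant
    rcases fdlp_bound x hpre' hb with ⟨m, hm, hsome⟩
    have hmx : ¬ ((m : Int) = x) := by omega
    have hA : is_fa_number x = isFaLoopA 299 [] (m : Int) := by
      rw [show is_fa_number x = isFaLoopA (299 + 1) PySem.Set.empty x from rfl, isFaLoopA_step]
      rw [show PySem.Set.contains PySem.Set.empty x = false from rfl]
      simp only [Bool.false_eq_true, if_false, hsome, hmx]
      rw [show PySem.Set.add PySem.Set.empty x = [x] from rfl]
      exact isFaLoopA_drop_head 299 x (by omega) [] m (by omega)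
    have hB : is_fa_number_alt x =
        (match fdlp? (m : Int) with
         | none => ""
         | some h => isFaLoopB 300 (m : Int) h) := by
      simp only [is_fa_number_alt, hsome]
    rw [hA, hB, tail_eq m (by omega)]
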